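-- pv_equiv track=rewrite | github.com/depp01030/AutoGui | mainWindow/ProgramFrame.py | get_valid_ver_list
-- ===== SOURCE A (Python) =====
-- def get_valid_ver_list(ver_list):
--     '''
--     ver_list = ['testProgram-240522-5-1235',
--                     'testProgram-240522-2-1235',
--                     'testProgram-240522-3-1239']
--
--     '''
--     valid_ver_list = []
--     for ver_name in ver_list:
--         if ''.join(ver_name.split('-')[1:3]).isdigit():
--             valid_ver_list.append(ver_name)
--
--     valid_ver_list = sorted(valid_ver_list, key = lambda x: int(''.join(x.split('-')[1:3])), reverse=True)
--     valid_ver_list = list(map(lambda x:'-'.join(x.split('-')[1:4]), valid_ver_list))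
--     return valid_ver_list
-- ===== SOURCE B (Python) =====
-- def get_valid_ver_list(ver_list):
--     # Online insertion sort: one pass; each valid name is inserted into its
--     # place in a descending-sorted accumulator (after equal keys, so tie order
--     # is the original order, matching a stable descending sort).
--     result = []  # list of (key, formatted), descending by key
--     for ver_name in ver_list:
--         parts = ver_name.split('-')
--         key_str = ''.join(parts[1:3])
--         if key_str.isdigit():
--             key = int(key_str)
--             fmt = '-'.join(parts[1:4])
--             i = 0
--             while i < len(result) and result[i][0] >= key:
--                 i += 1
--             result.insert(i, (key, fmt))
--     return [f for _, f in result]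
-- ===== Notes on version B (the rewrite author's own statement) =====
-- stated objective: alternative
-- what changed: B replaces A's three staged passes (filter, sorted() with a re-splitting key, then a re-splitting map) by a single online pass: each name is split once and, if valid, its (int key, formatted) pair is inserted directly into its position in a descending-sorted accumulator (after equal keys, preserving A's stable tie order); the answer is projected from the accumulator.
import Mathlib
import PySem

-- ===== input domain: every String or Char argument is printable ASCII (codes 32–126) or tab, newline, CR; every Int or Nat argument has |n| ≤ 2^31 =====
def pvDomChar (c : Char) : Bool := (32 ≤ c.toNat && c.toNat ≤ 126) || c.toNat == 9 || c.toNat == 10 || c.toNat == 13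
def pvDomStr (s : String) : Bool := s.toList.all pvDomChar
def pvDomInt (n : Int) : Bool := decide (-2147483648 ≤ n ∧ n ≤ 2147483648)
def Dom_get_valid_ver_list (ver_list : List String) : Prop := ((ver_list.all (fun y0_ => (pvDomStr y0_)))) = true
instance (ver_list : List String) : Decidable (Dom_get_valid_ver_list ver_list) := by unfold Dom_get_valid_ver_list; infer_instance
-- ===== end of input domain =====

-- B fuses A's three split-based passes (filter, sorted(), map) into one online pass that
-- inserts each valid name's (key, formatted) pair into a descending-sorted accumulator
-- (objective: alternative decomposition; same return value).


-- ===== PORT A =====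
-- x.split('-')  (sep ≠ "" so split? is always some; getD [] is never reached)
def pvParts (x : String) : List String := (PySem.Str.split? x "-").getD []
-- ''.join(x.split('-')[1:3])
def pvKeyStr (x : String) : String := PySem.Str.join "" (PySem.List.slice (pvParts x) (some 1) (some 3))
-- int(''.join(x.split('-')[1:3])); inside A it is applied only to names whose key string
-- is all-digits, where int() succeeds, so the getD 0 default is never reached
def pvKeyInt (x : String) : Int := (PySem.Int.ofStr? (pvKeyStr x)).getD 0
-- '-'.join(x.split('-')[1:4])
def pvFmt (x : String) : String := PySem.Str.join "-" (PySem.List.slice (pvParts x) (some 1) (some 4))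

def get_valid_ver_list (ver_list : List String) : List String :=
  let valid_ver_list := ver_list.foldl
    (fun acc ver_name => if PySem.Str.strIsdigit (pvKeyStr ver_name) then acc ++ [ver_name] else acc) []
  let sorted_list := PySem.List.sorted valid_ver_list pvKeyInt true
  sorted_list.map pvFmt

-- ===== PORT B =====
-- the 'i = 0; while i < len(result) and result[i][0] >= key: i += 1; result.insert(i, …)'
-- loop of Source B: walk past entries with key ≥ the new key, then place the pair there
def pvPlace (key : Int) (fmt : String) : List (Int × String) → List (Int × String)
  | [] => [(key, fmt)]
  | p :: rest => if p.1 ≥ key then p :: pvPlace key fmt rest else (key, fmt) :: p :: rest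

def get_valid_ver_list_alt (ver_list : List String) : List String :=
  let result := ver_list.foldl
    (fun result ver_name =>
      let key_str := pvKeyStr ver_name
      if PySem.Str.strIsdigit key_str then
        pvPlace ((PySem.Int.ofStr? key_str).getD 0) (pvFmt ver_name) result
      else result) []
  result.map (fun t => t.2)

-- ===== PRECONDITION & SPEC =====
def Spec_get_valid_ver_list (ver_list : List String) (out : List String) : Prop := out = get_valid_ver_list_alt ver_list
instance (ver_list : List String) (out : List String) : Decidable (Spec_get_valid_ver_list ver_list out) := by unfold Spec_get_valid_ver_list; infer_instance

-- ===== CLAIM (what is proved, stated in full; the proofs are below) =====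
def Claim_equal_get_valid_ver_list : Prop := ∀ (ver_list : List String), Dom_get_valid_ver_list ver_list → Spec_get_valid_ver_list ver_list (get_valid_ver_list ver_list)

-- ===== LEMMAS AND PROOFS =====

-- the pair B carries for a name: its sort key with its formatted form
def pvDec (x : String) : Int × String := (pvKeyInt x, pvFmt x)

-- B's placement is PySem's insertion step on pairs
lemma pv_place_eq_insertBy (k : Int) (f : String) (ys : List (Int × String)) :
    pvPlace k f ys
    = PySem.List.insertBy (fun a b : Int × String => decide (b.1 < a.1)) (k, f) ys := by
  induction ys with
  | nil => rfl
  | cons y ys ih =>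
    rw [pvPlace, PySem.List.insertBy]
    by_cases h : y.1 < k
    · have hd : (decide (y.1 < (k, f).1)) = true := decide_eq_true h
      rw [if_neg (not_le.mpr h), if_pos hd]
    · have hd : (decide (y.1 < (k, f).1)) = false := decide_eq_false h
      rw [if_pos (not_lt.mp h), if_neg (by simp only [hd]; exact Bool.false_ne_true), ih]

-- insertBy commutes with map pvDec: the comparator only reads the key, which pvDec preserves
lemma pv_insertBy_map_rev (x : String) (ys : List String) :
    PySem.List.insertBy (fun a b : Int × String => decide (b.1 < a.1)) (pvDec x) (ys.map pvDec)
    = (PySem.List.insertBy (fun a b : String => decide (pvKeyInt b < pvKeyInt a)) x ys).map pvDec := by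
  induction ys with
  | nil => rfl
  | cons y ys ih =>
    simp only [List.map_cons, PySem.List.insertBy]
    by_cases h : pvKeyInt y < pvKeyInt x
    · simp [pvDec, h]
    · simp [pvDec, h]
      exact ih

-- B's single pass builds exactly pvDec of A's reverse-sorted valid list
lemma pv_pass_eq (ver_list : List String) (accA : List String) :
    ver_list.foldl
      (fun result ver_name =>
        let key_str := pvKeyStr ver_name
        if PySem.Str.strIsdigit key_str then
          pvPlace ((PySem.Int.ofStr? key_str).getD 0) (pvFmt ver_name) result
        else result)
      ((PySem.List.sorted accA pvKeyInt true).map pvDec)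
    = (PySem.List.sorted
        (ver_list.foldl
          (fun acc ver_name => if PySem.Str.strIsdigit (pvKeyStr ver_name) then acc ++ [ver_name] else acc)
          accA) pvKeyInt true).map pvDec := by
  induction ver_list generalizing accA with
  | nil => rfl
  | cons v vs ih =>
    simp only [List.foldl_cons]
    by_cases h : PySem.Str.strIsdigit (pvKeyStr v)
    · rw [if_pos h, if_pos h]
      have hstep : pvPlace ((PySem.Int.ofStr? (pvKeyStr v)).getD 0) (pvFmt v)
            ((PySem.List.sorted accA pvKeyInt true).map pvDec)
          = (PySem.List.sorted (accA ++ [v]) pvKeyInt true).map pvDec := by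
        have : ((PySem.Int.ofStr? (pvKeyStr v)).getD 0) = pvKeyInt v := rfl
        rw [this, pv_place_eq_insertBy,
          show ((pvKeyInt v, pvFmt v) : Int × String) = pvDec v from rfl, pv_insertBy_map_rev,
          PySem.List.sorted_rev_eq_foldl_insertBy, PySem.List.sorted_rev_eq_foldl_insertBy,
          List.foldl_append]
        rfl
      rw [hstep]
      exact ih (accA ++ [v])
    · rw [if_neg h, if_neg h]
      exact ih accA

-- ===== VERDICT (by name: the statement is the Claim_ definition above) =====
theorem get_valid_ver_list_spec : Claim_equal_get_valid_ver_list := by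
  intro ver_list _
  unfold Spec_get_valid_ver_list get_valid_ver_list get_valid_ver_list_alt
  dsimp only
  have h0 : (PySem.List.sorted ([] : List String) pvKeyInt true).map pvDec = [] := rfl
  have h := pv_pass_eq ver_list []
  rw [h0] at h
  rw [h, List.map_map]
  rfl
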